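-- pv_equiv track=rewrite | github.com/VeamVeat/string-art | venv/Lib/site-packages/curve/curve.py | get_contiguous
-- ===== SOURCE A (Python) =====
-- def get_contiguous(x, nbins):
--     """
--     The list x contains indexes of a list which is nbins elements long.
--     This function locates all contiguous indexes and returns a list
--     of contiguous groups. Each group contains [first index, last index,
--     number of contiguous indexes]. The origin list is assumed circular,
--     therefore, if one group end at nbins-1 and another starts at 0,
--     they are merged into a single group.
--
--     Example:
--
--         >>> Curve.get_contiguous([0, 1, 5, 6, 9], 10)
--         [[5, 6, 2], [9, 1, 3]]
--
--     :param x: List of indexes of an origin list.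
--     :param nbins: Number of elements of the origin list.
--     :returns: List, each element is a 3-element list. Empty if
--               x is empty.
--     """
--
--     n = len(x)
--     if n == 0:
--         return []
--
--     groups = [[x[0], x[0], 1]]
--     for i in range(n - 1):
--         if x[i] + 1 == x[(i + 1) % n]:
--             groups[-1][1] = x[i + 1]
--             groups[-1][2] += 1
--         else:
--             groups.append([x[(i + 1) % n], x[(i + 1) % n], 1])
--
--     if groups[-1][1] == nbins - 1 and groups[0][0] == 0:
--         groups[0][0] = groups[-1][0]
--         groups[0][2] += groups[-1][2]
--         groups.pop()
--     return groups
-- ===== SOURCE B (Python) =====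
-- def get_contiguous(x, nbins):
--     n = len(x)
--     if n == 0:
--         return []
--     # Two-phase: first find every position where a new run starts, then
--     # build each group directly from its boundary pair.
--     breaks = [i + 1 for i in range(n - 1) if x[i] + 1 != x[i + 1]]
--     starts = [0] + breaks
--     ends = breaks + [n]
--     groups = [[x[a], x[b - 1], b - a] for a, b in zip(starts, ends)]
--     if groups[-1][1] == nbins - 1 and groups[0][0] == 0:
--         groups[0][0] = groups[-1][0]
--         groups[0][2] += groups[-1][2]
--         groups.pop()
--     return groups
-- ===== Notes on version B (the rewrite author's own statement) =====
-- stated objective: alternative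
-- what changed: A builds groups in one pass by mutating/appending the last group per element; B first computes the list of run-break positions, then constructs every group directly from its (start,end) boundary pair via zip, keeping the same circular wrap-merge tail.
import Mathlib
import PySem

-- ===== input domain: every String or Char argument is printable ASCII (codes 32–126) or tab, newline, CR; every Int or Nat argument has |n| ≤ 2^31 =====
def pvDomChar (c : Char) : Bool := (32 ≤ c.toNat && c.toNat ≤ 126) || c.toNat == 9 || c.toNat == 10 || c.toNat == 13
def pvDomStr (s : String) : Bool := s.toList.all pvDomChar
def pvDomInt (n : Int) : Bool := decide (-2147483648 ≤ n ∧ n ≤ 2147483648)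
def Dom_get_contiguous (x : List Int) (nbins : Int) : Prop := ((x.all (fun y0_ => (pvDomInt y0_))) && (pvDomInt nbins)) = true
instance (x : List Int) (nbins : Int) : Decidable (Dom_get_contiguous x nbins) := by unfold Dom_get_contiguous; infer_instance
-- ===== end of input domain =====

-- B replaces A's accumulator loop (mutate/append the last group per element) by a two-phase
-- construction: run-break positions first, then each group built from its boundary pair;
-- same wrap-merge tail, same O(n) cost (objective: alternative decomposition).

-- ===== PORT A =====
-- Shared tail of BOTH Pythons (the identical final merge lines of Source A and Source B):
-- `if groups[-1][1] == nbins - 1 and groups[0][0] == 0: …; groups.pop()`.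
-- Groups are (first, last, count) triples, rendered as 3-element lists at the end.
def pvWrap (groups : List (Int × Int × Int)) (nbins : Int) : List (Int × Int × Int) :=
  match groups, groups.getLast? with
  | (a0, b0, c0) :: rest, some (la, lb, lc) =>
    if lb == nbins - 1 && a0 == 0 then ((la, b0, c0 + lc) :: rest).dropLast
    else (a0, b0, c0) :: rest
  | g, _ => g

-- Loop body of A; groups are kept in REVERSE order (head = Python's groups[-1], the group
-- A mutates or appends after). All indices are in range, so pyGetD is exact here.
def pvA_step (x : List Int) (n : Nat) (g : List (Int × Int × Int)) (i : Int) :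
    List (Int × Int × Int) :=
  let xi := PySem.List.pyGetD x i 0
  let xj := PySem.List.pyGetD x (PySem.Int.mod (i + 1) (n : Int)) 0
  match g with
  | [] => []   -- unreachable: groups starts nonempty
  | (a, b, c) :: rest =>
    if xi + 1 == xj then (a, xj, c + 1) :: rest
    else (xj, xj, 1) :: (a, b, c) :: rest

def get_contiguous (x : List Int) (nbins : Int) : List (List Int) :=
  let n := x.length
  if n == 0 then []
  else
    let x0 := PySem.List.pyGetD x 0 0
    let revGroups := (PySem.List.pyRange 0 ((n : Int) - 1) 1).foldl (pvA_step x n) [(x0, x0, 1)]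
    (pvWrap revGroups.reverse nbins).map (fun g => [g.1, g.2.1, g.2.2])

-- ===== PORT B =====
-- [x[a], x[b-1], b-a] for one boundary pair (a, b); indices are always in range.
def pvBuild (x : List Int) (p : Nat × Nat) : Int × Int × Int :=
  (x.getD p.1 0, x.getD (p.2 - 1) 0, (p.2 : Int) - (p.1 : Int))

def get_contiguous_alt (x : List Int) (nbins : Int) : List (List Int) :=
  let n := x.length
  if n == 0 then []
  else
    let breaks := ((List.range (n - 1)).filter
        (fun i => !(x.getD i 0 + 1 == x.getD (i + 1) 0))).map (· + 1)
    let starts := 0 :: breaks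
    let ends := breaks ++ [n]
    let groups := (starts.zip ends).map (pvBuild x)
    (pvWrap groups nbins).map (fun g => [g.1, g.2.1, g.2.2])

-- ===== PRECONDITION & SPEC =====
def Spec_get_contiguous (x : List Int) (nbins : Int) (out : List (List Int)) : Prop := out = get_contiguous_alt x nbins
instance (x : List Int) (nbins : Int) (out : List (List Int)) : Decidable (Spec_get_contiguous x nbins out) := by unfold Spec_get_contiguous; infer_instance

-- ===== CLAIM (what is proved, stated in full; the proofs are below) =====
def Claim_equal_get_contiguous : Prop := ∀ (x : List Int) (nbins : Int), Dom_get_contiguous x nbins → Spec_get_contiguous x nbins (get_contiguous x nbins)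

-- ===== LEMMAS AND PROOFS =====

-- Reference form of the run decomposition: pvGo f l c t extends the open group
-- (f, l, c) through t, emitting a finished group at each break.
def pvGo (f l c : Int) : List Int → List (Int × Int × Int)
  | [] => [(f, l, c)]
  | y :: t => if l + 1 = y then pvGo f y (c + 1) t else (f, l, c) :: pvGo y y 1 t

-- A's loop body once both list reads are resolved.
def pvStep2 (g : List (Int × Int × Int)) (p : Int × Int) : List (Int × Int × Int) :=
  match g with
  | [] => []
  | (a, b, c) :: rest =>
    if p.1 + 1 == p.2 then (a, p.2, c + 1) :: rest
    else (p.2, p.2, 1) :: (a, b, c) :: rest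

lemma pvA_step_eq (x : List Int) (k : Nat) (hk : k + 1 < x.length) (g : List (Int × Int × Int)) :
    pvA_step x x.length g ((0 : Int) + (k : Nat)) =
      pvStep2 g (x.getD k 0, x.getD (k + 1) 0) := by
  have hmod : PySem.Int.mod ((0 : Int) + (k : Nat) + 1) (x.length : Int) = ((k + 1 : Nat) : Int) := by
    rw [PySem.Int.mod_eq_emod_of_pos (by exact_mod_cast Nat.zero_lt_of_lt hk)]
    rw [Int.emod_eq_of_lt (by omega) (by omega)]
    push_cast; ring
  simp only [pvA_step, pvStep2, hmod]
  have h0 : (0 : Int) + (k : Nat) = ((k : Nat) : Int) := by ring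
  rw [h0, PySem.List.pyGetD_natCast, PySem.List.pyGetD_natCast]

-- Index fold over range (n - 1) = fold over the list of adjacent pairs.
lemma pvFold_range_zip : ∀ (x : List Int) (g : List (Int × Int × Int)),
    (List.range (x.length - 1)).foldl
      (fun s k => pvStep2 s (x.getD k 0, x.getD (k + 1) 0)) g
      = (x.zip x.tail).foldl pvStep2 g := by
  intro x
  induction x with
  | nil => intro g; simp
  | cons a t ih =>
    intro g
    cases t with
    | nil => simp
    | cons b t' =>
      have hlen : (a :: b :: t').length - 1 = t'.length + 1 := by simp
      rw [hlen, List.range_succ_eq_map]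
      simp only [List.foldl_cons, List.foldl_map]
      have hbody : (List.range t'.length).foldl
          (fun s (k : Nat) => pvStep2 s ((a :: b :: t').getD k.succ 0, (a :: b :: t').getD (k.succ + 1) 0))
          (pvStep2 g ((a :: b :: t').getD 0 0, (a :: b :: t').getD (0 + 1) 0))
          = (List.range ((b :: t').length - 1)).foldl
            (fun s k => pvStep2 s ((b :: t').getD k 0, (b :: t').getD (k + 1) 0))
            (pvStep2 g (a, b)) := by
        simp only [List.length_cons, Nat.add_sub_cancel, List.getD_cons_succ, Nat.succ_eq_add_one,
          List.getD_cons_zero]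
      rw [hbody, ih]
      rfl

-- The reversed-accumulator fold is pvGo, appended after the reversed initial rest.
lemma pvFold_zip_go : ∀ (ys : List Int) (f l c : Int) (rest : List (Int × Int × Int)),
    (((l :: ys).zip ys).foldl pvStep2 ((f, l, c) :: rest)).reverse
      = rest.reverse ++ pvGo f l c ys := by
  intro ys
  induction ys with
  | nil => intro f l c rest; simp [pvGo]
  | cons y t ih =>
    intro f l c rest
    show ((((l, y) :: ((y :: t).zip t)).foldl pvStep2 ((f, l, c) :: rest))).reverse = _
    simp only [List.foldl_cons]
    by_cases h : l + 1 = y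
    · have : pvStep2 ((f, l, c) :: rest) (l, y) = (f, y, c + 1) :: rest := by
        simp [pvStep2, h]
      rw [this, ih, pvGo, if_pos h]
    · have : pvStep2 ((f, l, c) :: rest) (l, y) = (y, y, 1) :: (f, l, c) :: rest := by
        simp [pvStep2, h]
      rw [this, ih, pvGo, if_neg h]
      simp

-- A's groups (reversed accumulator, reversed back) are exactly pvGo.
lemma pvA_groups (a : Int) (t : List Int) :
    ((PySem.List.pyRange 0 (((a :: t).length : Int) - 1) 1).foldl
      (pvA_step (a :: t) (a :: t).length) [(a, a, 1)]).reverse = pvGo a a 1 t := by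
  have hrange : PySem.List.pyRange 0 (((a :: t).length : Int) - 1) 1
      = (List.range ((a :: t).length - 1)).map (fun k : Nat => (0 : Int) + k) := by
    rw [PySem.List.pyRange_one]
    congr 1
    simp
  rw [hrange, List.foldl_map]
  have hcongr : (List.range ((a :: t).length - 1)).foldl
      (fun s (k : Nat) => pvA_step (a :: t) (a :: t).length s ((0 : Int) + k)) [(a, a, 1)]
      = (List.range ((a :: t).length - 1)).foldl
        (fun s k => pvStep2 s ((a :: t).getD k 0, (a :: t).getD (k + 1) 0)) [(a, a, 1)] := by
    apply PySem.List.foldl_congr_mem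
    intro acc k hk
    have hlt : k < (a :: t).length - 1 := List.mem_range.mp hk
    exact pvA_step_eq (a :: t) k (by simp at hlt ⊢; omega) acc
  rw [hcongr, pvFold_range_zip]
  have h2 : (a :: t).zip (a :: t).tail = (a :: t).zip t := rfl
  rw [h2]
  have := pvFold_zip_go t a a 1 []
  simpa using this

-- ---- B side ----

-- Adjacent boundary pairs of a :: bs ++ [n].
def pvPairs (a : Nat) (bs : List Nat) (n : Nat) : List (Nat × Nat) :=
  match bs with
  | [] => [(a, n)]
  | b :: bs' => (a, b) :: pvPairs b bs' n

lemma pvZip_pairs : ∀ (bs : List Nat) (a n : Nat),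
    (a :: bs).zip (bs ++ [n]) = pvPairs a bs n := by
  intro bs
  induction bs with
  | nil => intro a n; simp [pvPairs]
  | cons b bs' ih => intro a n; simp [pvPairs, ih b n]

-- B's break positions, as a function (identical to the expression in the port).
def pvBreaks (x : List Int) : List Nat :=
  ((List.range (x.length - 1)).filter
    (fun i => !(x.getD i 0 + 1 == x.getD (i + 1) 0))).map (· + 1)

lemma pvBreaks_pos (x : List Int) : ∀ v ∈ pvBreaks x, 1 ≤ v := by
  intro v hv
  simp only [pvBreaks, List.mem_map] at hv
  obtain ⟨w, _, rfl⟩ := hv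
  omega

lemma pvBreaks_cons (a b : Int) (t : List Int) :
    pvBreaks (a :: b :: t)
      = (if a + 1 = b then ([] : List Nat) else [1]) ++ (pvBreaks (b :: t)).map (· + 1) := by
  have hP : ((fun i => !((a :: b :: t).getD i 0 + 1 == (a :: b :: t).getD (i + 1) 0)) ∘ Nat.succ)
      = (fun i => !((b :: t).getD i 0 + 1 == (b :: t).getD (i + 1) 0)) := by
    funext i
    simp
  simp only [pvBreaks, List.length_cons, Nat.add_sub_cancel, List.range_succ_eq_map,
    List.filter_cons, List.filter_map, List.getD_cons_zero, List.getD_cons_succ,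
    List.map_map]
  by_cases h : a + 1 = b
  · simp [h, Function.comp_def]
  · simp [h, Function.comp_def]

-- Replace the head group's first element and add c - 1 to its count.
def pvHeadAdj (f c : Int) : List (Int × Int × Int) → List (Int × Int × Int)
  | [] => []
  | (_, L, C) :: rest => (f, L, C + c - 1) :: rest

lemma pvGo_headAdj : ∀ (t : List Int) (f l c : Int),
    pvGo f l c t = pvHeadAdj f c (pvGo l l 1 t) := by
  intro t
  induction t with
  | nil =>
    intro f l c
    simp [pvGo, pvHeadAdj]
  | cons y t' ih =>
    intro f l c
    by_cases h : l + 1 = y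
    · rw [pvGo, if_pos h, ih f y (c + 1), pvGo, if_pos h, ih l y (1 + 1)]
      cases hg : pvGo y y 1 t' with
      | nil => simp [pvHeadAdj]
      | cons p rest =>
        obtain ⟨p1, p2, p3⟩ := p
        simp [pvHeadAdj]
        ring
    · rw [pvGo, if_neg h, pvGo, if_neg h]
      simp [pvHeadAdj]

-- A boundary pair shifted by one builds the same group over a :: t as over t.
lemma pvBuild_shift (a : Int) (t : List Int) (u v : Nat) (hv : 1 ≤ v) :
    pvBuild (a :: t) (u + 1, v + 1) = pvBuild t (u, v) := by
  simp only [pvBuild]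
  have h1 : (a :: t).getD (u + 1) 0 = t.getD u 0 := List.getD_cons_succ
  have h2 : (a :: t).getD (v + 1 - 1) 0 = t.getD (v - 1) 0 := by
    have hv' : v + 1 - 1 = (v - 1) + 1 := by omega
    rw [hv', List.getD_cons_succ]
  rw [h1, h2]
  have h3 : ((v + 1 : Nat) : Int) - ((u + 1 : Nat) : Int) = (v : Int) - (u : Int) := by
    push_cast; ring
  rw [h3]

lemma pvPairs_shift (a : Int) (t : List Int) : ∀ (bs : List Nat) (u m : Nat),
    1 ≤ m → (∀ v ∈ bs, 1 ≤ v) →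
    (pvPairs (u + 1) (bs.map (· + 1)) (m + 1)).map (pvBuild (a :: t))
      = (pvPairs u bs m).map (pvBuild t) := by
  intro bs
  induction bs with
  | nil =>
    intro u m hm _
    simp only [List.map_nil, pvPairs, List.map_cons]
    rw [pvBuild_shift a t u m hm]
  | cons v bs' ih =>
    intro u m hm hpos
    simp only [List.map_cons, pvPairs]
    rw [pvBuild_shift a t u v (hpos v (by simp))]
    rw [ih v m hm (fun w hw => hpos w (List.mem_cons_of_mem _ hw))]

-- The head group of a run starting at 0 absorbs the new first element a.
lemma pvHead_merge (a : Int) (t : List Int) (v : Nat) (hv : 1 ≤ v) :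
    pvBuild (a :: t) (0, v + 1)
      = (a, (pvBuild t (0, v)).2.1, (pvBuild t (0, v)).2.2 + (1 + 1) - 1) := by
  simp only [pvBuild, Prod.mk.injEq]
  refine ⟨rfl, ?_, ?_⟩
  · have hv' : v + 1 - 1 = (v - 1) + 1 := by omega
    rw [hv', List.getD_cons_succ]
  · push_cast; ring

-- B's groups are exactly pvGo.
lemma pvB_groups : ∀ (t : List Int) (a : Int),
    (pvPairs 0 (pvBreaks (a :: t)) (a :: t).length).map (pvBuild (a :: t)) = pvGo a a 1 t := by
  intro t
  induction t with
  | nil =>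
    intro a
    simp [pvBreaks, pvPairs, pvBuild, pvGo]
  | cons b t' ih =>
    intro a
    rw [pvBreaks_cons]
    have hm : 1 ≤ (b :: t').length := by simp
    have hlen : (a :: b :: t').length = (b :: t').length + 1 := by simp
    by_cases h : a + 1 = b
    · rw [if_pos h, List.nil_append, hlen]
      rw [pvGo, if_pos h, pvGo_headAdj t' a b (1 + 1), ← ih b]
      cases hbs : pvBreaks (b :: t') with
      | nil =>
        simp only [List.map_nil, pvPairs, List.map_cons, pvHeadAdj]
        rw [pvHead_merge a (b :: t') (b :: t').length hm]
      | cons v bs' =>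
        have hv : 1 ≤ v := pvBreaks_pos (b :: t') v (by rw [hbs]; simp)
        have hpos' : ∀ w ∈ bs', 1 ≤ w := fun w hw =>
          pvBreaks_pos (b :: t') w (by rw [hbs]; simp [hw])
        simp only [List.map_cons, pvPairs, pvHeadAdj]
        rw [pvHead_merge a (b :: t') v hv]
        rw [pvPairs_shift a (b :: t') bs' v (b :: t').length hm hpos']
    · rw [if_neg h, hlen]
      simp only [List.cons_append, List.nil_append, pvPairs]
      rw [List.map_cons]
      have hshift := pvPairs_shift a (b :: t') (pvBreaks (b :: t')) 0 (b :: t').length hm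
        (pvBreaks_pos (b :: t'))
      norm_num at hshift
      have ihb := ih b
      simp only [List.length_cons] at hshift ihb ⊢
      rw [hshift, ihb, pvGo, if_neg h]
      simp [pvBuild]

-- The two ports agree on every nonempty list.
lemma pvPorts_eq (a : Int) (t : List Int) (nbins : Int) :
    get_contiguous (a :: t) nbins = get_contiguous_alt (a :: t) nbins := by
  simp only [get_contiguous, get_contiguous_alt]
  have h0 : ((a :: t).length == 0) = false := by simp
  rw [h0]
  simp only [Bool.false_eq_true, if_false, PySem.List.pyGetD_zero_cons]
  have hA := pvA_groups a t
  have hB : (((0 :: pvBreaks (a :: t)).zip (pvBreaks (a :: t) ++ [(a :: t).length])).map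
      (pvBuild (a :: t))) = pvGo a a 1 t := by
    rw [pvZip_pairs, pvB_groups]
  have hbr : (List.map (fun x => x + 1)
      (List.filter (fun i => !(a :: t).getD i 0 + 1 == (a :: t).getD (i + 1) 0)
        (List.range ((a :: t).length - 1)))) = pvBreaks (a :: t) := rfl
  rw [hA, hbr, hB]

-- ===== VERDICT (by name: the statement is the Claim_ definition above) =====
theorem get_contiguous_spec : Claim_equal_get_contiguous := by
  intro x nbins _
  unfold Spec_get_contiguous
  cases x with
  | nil => rfl
  | cons a t => exact pvPorts_eq a t nbins
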